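-- pv_equiv track=rewrite | github.com/xeonqq/coding_excercise | codility/GenomicRangeQuery.py | solution
-- ===== SOURCE A (Python) =====
-- def prefix_sum(S):
--     index_map = {"A": 0, "C":1, "G":2, "T":3}
--
--     occurance_prefix_sum = [[0]*4 for _ in range(len(S)+1)]
--     for i, s in enumerate(S):
--         occurance_prefix_sum[i+1] = occurance_prefix_sum[i].copy()
--         occurance_prefix_sum[i+1][index_map[s]] +=1
--     return occurance_prefix_sum
--
-- def list_sub(l1, l2):
--     r = []
--     for a, b in zip(l1, l2):
--         r.append(a-b)
--     return r
--
-- def min_geno_factor(occurance):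
--     geno_map = {0: "A", 1: "C", 2: "G", 3: "T"}
--     d = {"A": 1, "C":2, "G":3, "T": 4}
--
--     for i, count in enumerate(occurance):
--         if count != 0:
--             return d[geno_map[i]]
--
-- def solution(S, P, Q):
--     # write your code in Python 3.6
--     prefix_s = prefix_sum(S)
--     result = []
--     for p, q in zip(P, Q):
--         occurance = list_sub(prefix_s[q+1], prefix_s[p])
--         factor = min_geno_factor(occurance)
--         result.append(factor)
--     return result
-- ===== SOURCE B (Python) =====
-- def solution(S, P, Q):
--     # Next-occurrence tables: nxt_c[i] = smallest index j >= i with S[j] == c,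
--     # or len(S) if there is none.  A query (p, q) has factor v iff the v-th
--     # nucleotide occurs in [p, q]; if none of A, C, G does, it must be all T.
--     n = len(S)
--     nxt_a = [n] * (n + 1)
--     nxt_c = [n] * (n + 1)
--     nxt_g = [n] * (n + 1)
--     for i in range(n - 1, -1, -1):
--         nxt_a[i] = i if S[i] == 'A' else nxt_a[i + 1]
--         nxt_c[i] = i if S[i] == 'C' else nxt_c[i + 1]
--         nxt_g[i] = i if S[i] == 'G' else nxt_g[i + 1]
--     result = []
--     for p, q in zip(P, Q):
--         if nxt_a[p] <= q:
--             result.append(1)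
--         elif nxt_c[p] <= q:
--             result.append(2)
--         elif nxt_g[p] <= q:
--             result.append(3)
--         else:
--             result.append(4)
--     return result
-- ===== Notes on version B (the rewrite author's own statement) =====
-- stated objective: alternative
-- what changed: Replaces the per-position prefix-sum table of 4-counters plus per-query vector subtraction and first-nonzero scan with three next-occurrence index tables built in one backward pass, answering each query by comparing nxt[p] <= q for A, C, G and defaulting to 4.
-- outside the precondition, e.g. on solution('ACGT', [2], [0]): A returns [2], B returns [4]; on solution('ACGT', [-1], [3]): A returns [None], B returns [4]
import Mathlib
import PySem

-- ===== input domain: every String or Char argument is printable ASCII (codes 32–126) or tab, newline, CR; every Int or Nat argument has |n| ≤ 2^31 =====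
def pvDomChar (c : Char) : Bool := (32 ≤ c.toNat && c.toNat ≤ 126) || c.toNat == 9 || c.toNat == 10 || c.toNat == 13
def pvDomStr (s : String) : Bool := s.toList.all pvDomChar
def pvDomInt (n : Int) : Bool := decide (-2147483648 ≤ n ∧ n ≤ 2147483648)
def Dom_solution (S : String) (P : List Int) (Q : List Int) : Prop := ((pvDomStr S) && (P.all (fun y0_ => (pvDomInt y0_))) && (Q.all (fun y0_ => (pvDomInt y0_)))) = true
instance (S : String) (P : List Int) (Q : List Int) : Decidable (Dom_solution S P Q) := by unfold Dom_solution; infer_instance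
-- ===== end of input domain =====

-- B replaces A's prefix-sum table of 4-counters (plus per-query vector subtraction and
-- first-nonzero scan) by three next-occurrence index tables built in one backward pass;
-- each query is answered by comparing nxt[p] ≤ q for 'A','C','G', defaulting to 4.

-- ===== PORT A =====
-- index_map[s]; Python raises KeyError for a char outside "ACGT" — those inputs are excluded by Pre_solution
def pvIndexMap (c : Char) : Int :=
  if c = 'A' then 0 else if c = 'C' then 1 else if c = 'G' then 2 else 3

-- occurance_prefix_sum[i+1][index_map[s]] += 1 (read-then-write of one cell)
def pvIncAt (l : List Int) (j : Int) : List Int :=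
  PySem.List.pySetD l j (PySem.List.pyGetD l j 0 + 1)

-- prefix_sum(S): preallocated rows, row i+1 = copy of row i with one cell incremented
def pvPrefixSum (L : List Char) : List (List Int) :=
  (PySem.List.enumerate L 0).foldl
    (fun rows is =>
      PySem.List.pySetD rows (is.1 + 1)
        (pvIncAt (PySem.List.pyGetD rows is.1 []) (pvIndexMap is.2)))
    (List.replicate (L.length + 1) ([0, 0, 0, 0] : List Int))

-- list_sub(l1, l2)
def pvListSub (l1 l2 : List Int) : List Int :=
  (l1.zip l2).foldl (fun r ab => r ++ [ab.1 - ab.2]) []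

def pvGenoMap (i : Int) : Char :=
  if i = 0 then 'A' else if i = 1 then 'C' else if i = 2 then 'G' else 'T'

def pvD (c : Char) : Int :=
  if c = 'A' then 1 else if c = 'C' then 2 else if c = 'G' then 3 else 4

-- min_geno_factor: first nonzero count wins; falls off the end (None) if all counts are 0
def pvMGF : List (Int × Int) → Option Int
  | [] => none
  | ic :: rest => if ic.2 ≠ 0 then some (pvD (pvGenoMap ic.1)) else pvMGF rest

def pvMinGenoFactor (occ : List Int) : Option Int :=
  pvMGF (PySem.List.enumerate occ 0)

-- Python appends min_geno_factor's result; under Pre_solution it is always an int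
-- (None only on empty/degenerate ranges, excluded), so the Option is unwrapped with .getD 0.
def solution (S : String) (P : List Int) (Q : List Int) : List Int :=
  let prefix_s := pvPrefixSum S.toList
  (P.zip Q).foldl
    (fun result pq =>
      let occ := pvListSub (PySem.List.pyGetD prefix_s (pq.2 + 1) [])
                           (PySem.List.pyGetD prefix_s pq.1 [])
      result ++ [(pvMinGenoFactor occ).getD 0])
    []

-- ===== PORT B =====
-- the backward loop building nxt_c: entry at absolute index i is i if S[i] == c else nxt_c[i+1];
-- the trailing sentinel entry is n.  tail.headD n is exactly nxt_c[i+1] (the tail is never empty).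
def pvNxt (c : Char) (n : Int) : List Char → Int → List Int
  | [], _ => [n]
  | ch :: rest, i =>
    let tail := pvNxt c n rest (i + 1)
    (if ch = c then i else tail.headD n) :: tail

-- B indexes nxt_x[p]; under Pre_solution p is in range, so the default n is never used.
def solution_alt (S : String) (P : List Int) (Q : List Int) : List Int :=
  let n : Int := (S.toList.length : Int)
  let na := pvNxt 'A' n S.toList 0
  let nc := pvNxt 'C' n S.toList 0
  let ng := pvNxt 'G' n S.toList 0
  (P.zip Q).foldl
    (fun result pq =>
      result ++ [if PySem.List.pyGetD na pq.1 n ≤ pq.2 then 1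
                 else if PySem.List.pyGetD nc pq.1 n ≤ pq.2 then 2
                 else if PySem.List.pyGetD ng pq.1 n ≤ pq.2 then 3
                 else 4])
    []

-- ===== PRECONDITION & SPEC =====
-- Pre_ excludes: chars outside "ACGT" (A raises KeyError), query bounds outside 0 ≤ p ≤ q < len(S)
-- (A raises IndexError, or wraps a negative index / reads an empty or reversed range, where it
-- returns None — not an int — or an accidental value of leftover negative counts; such degenerate
-- ranges are a corner no caller specifies).
def Pre_solution (S : String) (P : List Int) (Q : List Int) : Prop :=
  (S.toList.all (fun c => c == 'A' || c == 'C' || c == 'G' || c == 'T') = true) ∧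
  (∀ pq ∈ P.zip Q, 0 ≤ pq.1 ∧ pq.1 ≤ pq.2 ∧ pq.2 < (S.toList.length : Int))
instance (S : String) (P : List Int) (Q : List Int) : Decidable (Pre_solution S P Q) := by
  unfold Pre_solution; infer_instance

def pvWitness_solution : String × List Int × List Int := ("CGA", [0, 1], [2, 2])

def Spec_solution (S : String) (P : List Int) (Q : List Int) (out : List Int) : Prop := out = solution_alt S P Q
instance (S : String) (P : List Int) (Q : List Int) (out : List Int) : Decidable (Spec_solution S P Q out) := by unfold Spec_solution; infer_instance

-- ===== CLAIM (what is proved, stated in full; the proofs are below) =====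
def Claim_equal_solution : Prop := ∀ (S : String) (P : List Int) (Q : List Int), Dom_solution S P Q → Pre_solution S P Q → Spec_solution S P Q (solution S P Q)

-- ===== LEMMAS AND PROOFS =====

-- the nucleotide count row of a prefix: [#A, #C, #G, #T]
def pvCnt (c : Char) (l : List Char) : Int := ((l.countP (fun x => x = c)) : Int)
def pvRow (l : List Char) : List Int := [pvCnt 'A' l, pvCnt 'C' l, pvCnt 'G' l, pvCnt 'T' l]

-- the rows A's loop writes at positions 1.., starting from row r
def pvChain (r : List Int) : List Char → List (List Int)
  | [] => []
  | c :: rest => pvIncAt r (pvIndexMap c) :: pvChain (pvIncAt r (pvIndexMap c)) rest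

lemma pvIncAt_row (l : List Char) (c : Char)
    (hc : c = 'A' ∨ c = 'C' ∨ c = 'G' ∨ c = 'T') :
    pvIncAt (pvRow l) (pvIndexMap c) = pvRow (l ++ [c]) := by
  rcases hc with h | h | h | h <;> subst h <;>
    simp [pvIncAt, pvIndexMap, pvRow, pvCnt, List.countP_append,
      PySem.List.pySetD, PySem.List.pyGetD, PySem.List.pySet?, PySem.List.pyGet?,
      PySem.List.pyIdx?]

lemma pvFold_chain (L : List Char) : ∀ (i : Nat) (rows : List (List Int)),
    rows.length = i + L.length + 1 →
    (PySem.List.enumerate L (i : Int)).foldl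
      (fun rows is =>
        PySem.List.pySetD rows (is.1 + 1)
          (pvIncAt (PySem.List.pyGetD rows is.1 []) (pvIndexMap is.2))) rows
      = rows.take (i + 1) ++ pvChain (rows.getD i []) L := by
  induction L with
  | nil =>
    intro i rows h
    simp only [PySem.List.enumerate, pvChain, List.foldl_nil, List.append_nil]
    rw [List.take_of_length_le (by simp at h; omega)]
  | cons c rest ih =>
    intro i rows h
    rw [PySem.List.enumerate_cons]
    simp only [List.foldl_cons]
    have hset : PySem.List.pySetD rows ((i : Int) + 1)
        (pvIncAt (PySem.List.pyGetD rows (i : Int) []) (pvIndexMap c))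
        = rows.set (i + 1) (pvIncAt (rows.getD i []) (pvIndexMap c)) := by
      have : ((i : Int) + 1) = (((i + 1 : Nat)) : Int) := by push_cast; ring
      rw [this, PySem.List.pySetD_natCast, PySem.List.pyGetD_natCast]
    rw [hset]
    have hcast : ((i : Int) + 1) = (((i + 1 : Nat)) : Int) := by push_cast; ring
    rw [hcast, ih (i + 1) _ (by simp at h ⊢; omega)]
    set r' := pvIncAt (rows.getD i []) (pvIndexMap c) with hr'
    have hlen : i + 1 < rows.length := by simp at h; omega
    have h1 : (rows.set (i + 1) r').getD (i + 1) [] = r' := by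
      simp [List.getD, List.getElem?_set_self hlen]
    have h2 : (rows.set (i + 1) r').take (i + 1 + 1) = rows.take (i + 1) ++ [r'] := by
      rw [List.set_eq_take_append_cons_drop, if_pos (by omega)]
      have hl : (rows.take (i+1)).length = i + 1 := by simp; omega
      rw [show i + 1 + 1 = (rows.take (i+1)).length + 1 from by omega, List.take_append]
      simp
    rw [h1, h2, pvChain]
    simp only [List.append_assoc, List.singleton_append]
    simp [hr', List.getD]

lemma pvPrefixSum_eq (L : List Char) :
    pvPrefixSum L = [0, 0, 0, 0] :: pvChain [0, 0, 0, 0] L := by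
  unfold pvPrefixSum
  rw [show (0 : Int) = ((0 : Nat) : Int) from rfl,
    pvFold_chain L 0 _ (by simp)]
  cases L <;> simp [List.replicate_succ, List.getD]

lemma pvChain_getElem (L : List Char) : ∀ (l : List Char) (k : Nat), k < L.length →
    (∀ c ∈ L, c = 'A' ∨ c = 'C' ∨ c = 'G' ∨ c = 'T') →
    (pvChain (pvRow l) L)[k]? = some (pvRow (l ++ L.take (k + 1))) := by
  induction L with
  | nil => intro l k hk; simp at hk
  | cons c rest ih =>
    intro l k hk hall
    have hc : c = 'A' ∨ c = 'C' ∨ c = 'G' ∨ c = 'T' := hall c (by simp)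
    rw [pvChain, pvIncAt_row l c hc]
    cases k with
    | zero => simp [List.take]
    | succ k =>
      simp only [List.getElem?_cons_succ]
      rw [ih (l ++ [c]) k (by simp at hk; omega) (fun x hx => hall x (by simp [hx]))]
      simp

lemma pvPrefixSum_getD (L : List Char) (k : Nat) (hk : k ≤ L.length)
    (hall : ∀ c ∈ L, c = 'A' ∨ c = 'C' ∨ c = 'G' ∨ c = 'T') :
    (pvPrefixSum L).getD k [] = pvRow (L.take k) := by
  rw [pvPrefixSum_eq, show ([0,0,0,0] : List Int) = pvRow [] from by simp [pvRow, pvCnt]]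
  cases k with
  | zero => simp [List.getD, pvRow, pvCnt]
  | succ k =>
    simp only [List.getD, List.getElem?_cons_succ]
    rw [pvChain_getElem L [] k (by omega) hall]
    simp

-- B side: entry k of pvNxt is the first absolute position of c at or after k (n if none)
def pvFirstAt (c : Char) (n : Int) : List Char → Int → Int
  | [], _ => n
  | ch :: rest, i => if ch = c then i else pvFirstAt c n rest (i + 1)

lemma pvNxt_getElem (c : Char) (n : Int) :
    ∀ (L : List Char) (i : Int) (k : Nat), k ≤ L.length →
    (pvNxt c n L i)[k]? = some (pvFirstAt c n (L.drop k) (i + k)) := by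
  intro L
  induction L with
  | nil =>
    intro i k hk
    have hk0 : k = 0 := by simpa using hk
    subst hk0; simp [pvNxt, pvFirstAt]
  | cons ch rest ih =>
    intro i k hk
    rw [pvNxt]
    cases k with
    | zero =>
      simp only [List.getElem?_cons_zero, List.drop_zero, pvFirstAt]
      have ht : (pvNxt c n rest (i + 1)).head?.getD n = pvFirstAt c n rest (i + 1) := by
        have h0 := ih (i + 1) 0 (by omega)
        simp only [List.drop_zero, Int.natCast_zero, add_zero] at h0
        cases hl : pvNxt c n rest (i + 1) with
        | nil => rw [hl] at h0; simp at h0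
        | cons a t => rw [hl] at h0; simp at h0; simp [h0]
      simp [ht]
    | succ k =>
      simp only [List.getElem?_cons_succ]
      rw [ih (i + 1) k (by simp at hk; omega)]
      congr 2
      push_cast; ring

lemma pvFirstAt_le_iff (c : Char) (n q : Int) (hqn : q < n) :
    ∀ (l : List Char) (s : Int),
    (pvFirstAt c n l s ≤ q ↔ c ∈ l.take (q - s + 1).toNat) := by
  intro l
  induction l with
  | nil => intro s; simp [pvFirstAt]; omega
  | cons ch rest ih =>
    intro s
    rw [pvFirstAt]
    by_cases hc : ch = c
    · subst hc
      rw [if_pos rfl]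
      constructor
      · intro hs
        rw [show (q - s + 1).toNat = ((q-s+1).toNat - 1) + 1 from by omega, List.take_succ_cons]
        simp
      · intro hm
        by_contra hsq
        have : (q - s + 1).toNat = 0 := by omega
        rw [this] at hm; simp at hm
    · rw [if_neg hc, ih (s + 1)]
      by_cases hle : s ≤ q
      · rw [show (q - s + 1).toNat = (q - (s+1) + 1).toNat + 1 from by omega, List.take_succ_cons]
        simp [Ne.symm hc]
      · have h1 : (q - s + 1).toNat = 0 := by omega
        have h2 : (q - (s+1) + 1).toNat = 0 := by omega
        rw [h1, h2]; simp

-- counts of the slice S[p..q]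
lemma pvCnt_sub (c : Char) (L : List Char) (pn qn : Nat) (h : pn ≤ qn) :
    pvCnt c (L.take (qn + 1)) - pvCnt c (L.take pn)
      = pvCnt c ((L.drop pn).take (qn + 1 - pn)) := by
  unfold pvCnt
  rw [show qn + 1 = pn + (qn + 1 - pn) from by omega, List.take_add, List.countP_append,
    show pn + (qn + 1 - pn) - pn = qn + 1 - pn from by omega]
  push_cast
  ring

lemma pvMGF4 (a b c d : Int) :
    pvMinGenoFactor [a, b, c, d]
      = if a ≠ 0 then some 1 else if b ≠ 0 then some 2
        else if c ≠ 0 then some 3 else if d ≠ 0 then some 4 else none := by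
  simp [pvMinGenoFactor, PySem.List.enumerate_cons, PySem.List.enumerate_nil,
    pvMGF, pvGenoMap, pvD]

lemma pvListSub_row (l1 l2 : List Char) :
    pvListSub (pvRow l1) (pvRow l2)
      = [pvCnt 'A' l1 - pvCnt 'A' l2, pvCnt 'C' l1 - pvCnt 'C' l2,
         pvCnt 'G' l1 - pvCnt 'G' l2, pvCnt 'T' l1 - pvCnt 'T' l2] := rfl

lemma pvCnt_ne_zero_iff (c : Char) (l : List Char) : pvCnt c l ≠ 0 ↔ c ∈ l := by
  unfold pvCnt
  rw [show ((l.countP (fun x => x = c) : Int) ≠ 0) ↔ l.countP (fun x => x = c) ≠ 0 from by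
    exact_mod_cast Iff.rfl]
  rw [Ne, List.countP_eq_zero]
  simp

lemma pvQuery_eq (L : List Char)
    (hall : ∀ c ∈ L, c = 'A' ∨ c = 'C' ∨ c = 'G' ∨ c = 'T')
    (p q : Int) (hp : 0 ≤ p) (hpq : p ≤ q) (hq : q < (L.length : Int)) :
    ((pvMinGenoFactor (pvListSub (PySem.List.pyGetD (pvPrefixSum L) (q + 1) [])
        (PySem.List.pyGetD (pvPrefixSum L) p []))).getD 0)
      = (if PySem.List.pyGetD (pvNxt 'A' (L.length : Int) L 0) p (L.length : Int) ≤ q then 1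
         else if PySem.List.pyGetD (pvNxt 'C' (L.length : Int) L 0) p (L.length : Int) ≤ q then 2
         else if PySem.List.pyGetD (pvNxt 'G' (L.length : Int) L 0) p (L.length : Int) ≤ q then 3
         else 4) := by
  set pn := p.toNat with hpn
  set qn := q.toNat with hqn
  have hp' : p = ((pn : Nat) : Int) := by omega
  have hq1 : q + 1 = (((qn + 1 : Nat)) : Int) := by omega
  have hpnq : pn ≤ qn := by omega
  set mid := (L.drop pn).take (qn + 1 - pn) with hmid
  -- A side: prefix rows are nucleotide counts of prefixes; their difference counts mid
  rw [hp', hq1, PySem.List.pyGetD_natCast, PySem.List.pyGetD_natCast,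
    pvPrefixSum_getD L (qn + 1) (by omega) hall,
    pvPrefixSum_getD L pn (by omega) hall,
    pvListSub_row,
    pvCnt_sub 'A' L pn qn hpnq, pvCnt_sub 'C' L pn qn hpnq,
    pvCnt_sub 'G' L pn qn hpnq, pvCnt_sub 'T' L pn qn hpnq,
    pvMGF4]
  -- B side: the table entry at p is the first occurrence position at/after p
  have hB : ∀ c : Char,
      PySem.List.pyGetD (pvNxt c (L.length : Int) L 0) ((pn : Nat) : Int) (L.length : Int)
        = pvFirstAt c (L.length : Int) (L.drop pn) ((pn : Nat) : Int) := by
    intro c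
    rw [PySem.List.pyGetD_natCast]
    simp only [List.getD]
    rw [pvNxt_getElem c (L.length : Int) L 0 pn (by omega)]
    simp
  rw [hB 'A', hB 'C', hB 'G']
  have hcond : ∀ c : Char,
      (pvFirstAt c (L.length : Int) (L.drop pn) ((pn : Nat) : Int) ≤ q ↔ c ∈ mid) := by
    intro c
    rw [pvFirstAt_le_iff c (L.length : Int) q hq]
    rw [hmid, show (q - (pn : Int) + 1).toNat = qn + 1 - pn from by omega]
  have hmidne : mid ≠ [] := by
    rw [hmid]
    have : ((L.drop pn).take (qn + 1 - pn)).length = min (qn + 1 - pn) (L.length - pn) := by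
      simp
    intro hnil
    rw [hnil] at this
    simp at this
    omega
  by_cases hA : 'A' ∈ mid
  · rw [if_pos ((hcond 'A').mpr hA), if_pos ((pvCnt_ne_zero_iff 'A' mid).mpr hA)]
    rfl
  · rw [if_neg (fun h => hA ((hcond 'A').mp h)),
      if_neg (fun h => hA ((pvCnt_ne_zero_iff 'A' mid).mp h))]
    by_cases hC : 'C' ∈ mid
    · rw [if_pos ((hcond 'C').mpr hC), if_pos ((pvCnt_ne_zero_iff 'C' mid).mpr hC)]
      rfl
    · rw [if_neg (fun h => hC ((hcond 'C').mp h)),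
        if_neg (fun h => hC ((pvCnt_ne_zero_iff 'C' mid).mp h))]
      by_cases hG : 'G' ∈ mid
      · rw [if_pos ((hcond 'G').mpr hG), if_pos ((pvCnt_ne_zero_iff 'G' mid).mpr hG)]
        rfl
      · rw [if_neg (fun h => hG ((hcond 'G').mp h)),
          if_neg (fun h => hG ((pvCnt_ne_zero_iff 'G' mid).mp h))]
        have hT : 'T' ∈ mid := by
          obtain ⟨x, hx⟩ := List.exists_mem_of_ne_nil mid hmidne
          have hxL : x ∈ L := List.mem_of_mem_drop (List.mem_of_mem_take hx)
          rcases hall x hxL with h | h | h | h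
          · exact absurd (h ▸ hx) hA
          · exact absurd (h ▸ hx) hC
          · exact absurd (h ▸ hx) hG
          · exact h ▸ hx
        rw [if_pos ((pvCnt_ne_zero_iff 'T' mid).mpr hT)]
        rfl

-- ===== VERDICT (by name: the statement is the Claim_ definition above) =====
theorem solution_spec : Claim_equal_solution := by
  intro S P Q _hdom hpre
  unfold Spec_solution solution solution_alt
  rcases hpre with ⟨hallb, hpq⟩
  have hall : ∀ c ∈ S.toList, c = 'A' ∨ c = 'C' ∨ c = 'G' ∨ c = 'T' := by
    intro c hc
    have := List.all_eq_true.mp hallb c hc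
    simp only [Bool.or_eq_true, beq_iff_eq] at this
    tauto
  rw [PySem.List.foldl_append_singleton_eq_map, PySem.List.foldl_append_singleton_eq_map]
  simp only [List.nil_append]
  apply List.map_congr_left
  intro pq hmem
  rcases hpq pq hmem with ⟨h1, h2, h3⟩
  exact pvQuery_eq S.toList hall pq.1 pq.2 h1 h2 h3
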